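-- pv_equiv track=rewrite | github.com/monotera/intro-AI | Proyecto3/script.py | get_combinations_unknown_vars
-- ===== SOURCE A (Python) =====
-- import itertools
--
-- def get_var_options(data, data_names):
--     options = []
--     for k in data:
--         if k not in data_names:
--             options.append(k)
--     return options
--
-- def get_combinations_unknown_vars(unknown_vars, data_names, data):
--     unknown_vars_options = []
--     for var in unknown_vars:
--         var_options = get_var_options(data[var], data_names)
--         var_options = [var + ":"+s for s in var_options]
--         unknown_vars_options.append(var_options)
--     combinations = list(itertools.product(*unknown_vars_options))
--     return combinations
-- ===== SOURCE B (Python) =====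
-- def get_combinations_unknown_vars(unknown_vars, data_names, data):
--     opts = [[var + ":" + k for k in data[var] if k not in data_names]
--             for var in unknown_vars]
--     total = 1
--     for o in opts:
--         total *= len(o)
--     result = []
--     for i in range(total):
--         combo = []
--         rem = i
--         for o in reversed(opts):
--             combo.append(o[rem % len(o)])
--             rem //= len(o)
--         combo.reverse()
--         result.append(tuple(combo))
--     return result
-- ===== Notes on version B (the rewrite author's own statement) =====
-- stated objective: alternative
-- what changed: B replaces itertools.product's nested expansion by mixed-radix index decoding: it computes the total number of combinations and reconstructs the i-th combination directly from the index i with % and // per variable (an odometer), instead of expanding lists of partial tuples.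
import Mathlib
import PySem

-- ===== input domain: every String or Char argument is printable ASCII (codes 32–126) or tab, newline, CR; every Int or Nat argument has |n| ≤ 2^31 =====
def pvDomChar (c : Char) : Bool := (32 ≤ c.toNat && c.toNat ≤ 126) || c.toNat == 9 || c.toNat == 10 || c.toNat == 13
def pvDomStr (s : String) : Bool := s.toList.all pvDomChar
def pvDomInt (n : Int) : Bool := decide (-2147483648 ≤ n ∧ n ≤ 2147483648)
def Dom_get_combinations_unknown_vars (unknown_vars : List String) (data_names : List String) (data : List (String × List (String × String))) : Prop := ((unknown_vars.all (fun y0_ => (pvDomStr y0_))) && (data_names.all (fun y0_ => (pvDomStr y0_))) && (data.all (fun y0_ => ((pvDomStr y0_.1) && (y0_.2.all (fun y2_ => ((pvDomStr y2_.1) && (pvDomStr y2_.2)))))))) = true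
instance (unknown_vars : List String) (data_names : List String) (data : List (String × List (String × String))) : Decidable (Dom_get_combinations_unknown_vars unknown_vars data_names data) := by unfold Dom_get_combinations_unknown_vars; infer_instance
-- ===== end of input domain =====

-- B replaces itertools.product's nested expansion by mixed-radix index decoding (an
-- odometer): it counts the combinations and reconstructs the i-th one directly from
-- the index i with % and // per variable; objective: alternative (same cost).

-- ===== PORT A =====
-- literal port of get_var_options: loop over the dict's keys, append if not in data_names
def get_var_options (data : List (String × String)) (data_names : List String) : List String :=
  data.foldl (fun options k => if data_names.contains k.1 then options else options ++ [k.1]) []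

-- data[var] would raise KeyError when var is missing; Pre_ excludes that, the port uses getD []
def get_combinations_unknown_vars (unknown_vars : List String) (data_names : List String) (data : List (String × List (String × String))) : List (List String) :=
  let unknown_vars_options := unknown_vars.foldl (fun acc var =>
    let var_options := get_var_options (((PySem.Dict.mk data).get? var).getD []) data_names
    let var_options := var_options.map (fun s => var ++ ":" ++ s)
    acc ++ [var_options]) []
  -- list(itertools.product(*unknown_vars_options)): right-to-left nesting, later lists vary fastest
  unknown_vars_options.foldr (fun opts rest => opts.flatMap (fun o => rest.map (fun r => o :: r))) [[]]

-- ===== PORT B =====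
-- the inner `for o in reversed(opts)` loop body: combo.append(o[rem % len(o)]); rem //= len(o)
-- o[rem % len(o)] is always in range when the loop runs (rem % len < len, len > 0 since total > 0),
-- so List.getD with default "" is exact here
def gcuvStep (p : List String × Nat) (o : List String) : List String × Nat :=
  (p.1 ++ [o.getD (p.2 % o.length) ""], p.2 / o.length)

def get_combinations_unknown_vars_alt (unknown_vars : List String) (data_names : List String) (data : List (String × List (String × String))) : List (List String) :=
  let opts := unknown_vars.map (fun var =>
    (((PySem.Dict.mk data).get? var).getD []).filterMap
      (fun kv : String × String => if data_names.contains kv.1 then none else some (var ++ ":" ++ kv.1)))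
  let total := opts.foldl (fun t o => t * o.length) 1
  (List.range total).map (fun i => ((opts.reverse.foldl gcuvStep ([], i)).1).reverse)

-- ===== PRECONDITION & SPEC =====
-- Pre_ excludes inputs where Python A raises KeyError (a var of unknown_vars missing from data);
-- the Nodup conjuncts only require the association lists to be faithful images of Python dicts,
-- whose keys are unique (a duplicated key cannot occur in the Python value the list encodes).
def Pre_get_combinations_unknown_vars (unknown_vars : List String) (data_names : List String) (data : List (String × List (String × String))) : Prop :=
  (∀ v ∈ unknown_vars, v ∈ data.map Prod.fst) ∧ (data.map Prod.fst).Nodup ∧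
    ∀ p ∈ data, (p.2.map Prod.fst).Nodup
instance (unknown_vars : List String) (data_names : List String) (data : List (String × List (String × String))) : Decidable (Pre_get_combinations_unknown_vars unknown_vars data_names data) := by unfold Pre_get_combinations_unknown_vars; infer_instance

def pvWitness_get_combinations_unknown_vars : List String × List String × (List (String × List (String × String))) :=
  (["A", "B"], ["x"], [("A", [("a", "1"), ("x", "2")]), ("B", [("b", "3")])])

def Spec_get_combinations_unknown_vars (unknown_vars : List String) (data_names : List String) (data : List (String × List (String × String))) (out : List (List String)) : Prop := out = get_combinations_unknown_vars_alt unknown_vars data_names data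
instance (unknown_vars : List String) (data_names : List String) (data : List (String × List (String × String))) (out : List (List String)) : Decidable (Spec_get_combinations_unknown_vars unknown_vars data_names data out) := by unfold Spec_get_combinations_unknown_vars; infer_instance

-- ===== CLAIM (what is proved, stated in full; the proofs are below) =====
def Claim_equal_get_combinations_unknown_vars : Prop := ∀ (unknown_vars : List String) (data_names : List String) (data : List (String × List (String × String))), Dom_get_combinations_unknown_vars unknown_vars data_names data → Pre_get_combinations_unknown_vars unknown_vars data_names data → Spec_get_combinations_unknown_vars unknown_vars data_names data (get_combinations_unknown_vars unknown_vars data_names data)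

-- ===== LEMMAS AND PROOFS =====

-- the digit sequence the odometer loop produces (least-significant list first)
def gcuvDigits : List (List String) → Nat → List String
  | [], _ => []
  | o :: Ls, i => o.getD (i % o.length) "" :: gcuvDigits Ls (i / o.length)

-- product of the lengths
def gcuvPlen : List (List String) → Nat
  | [] => 1
  | o :: Ls => o.length * gcuvPlen Ls

-- the foldr itertools.product shape
def gcuvProdList : List (List String) → List (List String)
  | [] => [[]]
  | o :: Ls => o.flatMap (fun x => (gcuvProdList Ls).map (x :: ·))

theorem gcuv_foldl_step : ∀ (Ls : List (List String)) (c : List String) (i : Nat),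
    Ls.foldl gcuvStep (c, i) = (c ++ gcuvDigits Ls i, i / gcuvPlen Ls) := by
  intro Ls
  induction Ls with
  | nil => intro c i; simp [gcuvDigits, gcuvPlen]
  | cons o Ls ih =>
    intro c i
    simp [List.foldl_cons, gcuvStep, ih, gcuvDigits, gcuvPlen, Nat.div_div_eq_div_mul]

theorem gcuv_digits_append : ∀ (Ls Ms : List (List String)) (i : Nat),
    gcuvDigits (Ls ++ Ms) i = gcuvDigits Ls i ++ gcuvDigits Ms (i / gcuvPlen Ls) := by
  intro Ls
  induction Ls with
  | nil => intro Ms i; simp [gcuvDigits, gcuvPlen]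
  | cons o Ls ih =>
    intro Ms i
    simp [gcuvDigits, gcuvPlen, ih, Nat.div_div_eq_div_mul]

theorem gcuv_digits_mod : ∀ (Ls : List (List String)) (i : Nat),
    gcuvDigits Ls (i % gcuvPlen Ls) = gcuvDigits Ls i := by
  intro Ls
  induction Ls with
  | nil => intro i; simp [gcuvDigits]
  | cons o Ls ih =>
    intro i
    have h1 : (i % (o.length * gcuvPlen Ls)) % o.length = i % o.length :=
      Nat.mod_mod_of_dvd i ⟨gcuvPlen Ls, rfl⟩
    have h2 : (i % (o.length * gcuvPlen Ls)) / o.length = i / o.length % gcuvPlen Ls :=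
      Nat.mod_mul_right_div_self i o.length (gcuvPlen Ls)
    simp [gcuvDigits, gcuvPlen, h1, h2, ih]

theorem gcuv_plen_append : ∀ (Ls Ms : List (List String)),
    gcuvPlen (Ls ++ Ms) = gcuvPlen Ls * gcuvPlen Ms := by
  intro Ls
  induction Ls with
  | nil => intro Ms; simp [gcuvPlen]
  | cons o Ls ih => intro Ms; simp [gcuvPlen, ih, Nat.mul_assoc]

theorem gcuv_plen_reverse (Ls : List (List String)) : gcuvPlen Ls.reverse = gcuvPlen Ls := by
  induction Ls with
  | nil => rfl
  | cons o Ls ih => simp [gcuvPlen, List.reverse_cons, gcuv_plen_append, ih, Nat.mul_comm]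

theorem gcuv_foldl_mul : ∀ (Ls : List (List String)) (c : Nat),
    Ls.foldl (fun t o => t * o.length) c = c * gcuvPlen Ls := by
  intro Ls
  induction Ls with
  | nil => intro c; simp [gcuvPlen]
  | cons o Ls ih => intro c; simp [List.foldl_cons, ih, gcuvPlen, Nat.mul_assoc]

theorem gcuv_range_mul (a b : Nat) (f : Nat → List String) :
    (List.range (a * b)).map f
      = (List.range a).flatMap (fun q => (List.range b).map (fun r => f (q * b + r))) := by
  induction a with
  | zero => simp
  | succ a ih =>
    rw [Nat.succ_mul, List.range_add, List.map_append, ih, List.range_succ, List.flatMap_append]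
    simp [List.map_map, Function.comp_def, Nat.add_comm]

theorem gcuv_getD_range (o : List String) :
    (List.range o.length).map (fun q => o.getD q "") = o := by
  apply List.ext_getElem
  · simp
  · intro i h1 h2
    simp [List.getElem?_eq_getElem h2]

-- the main lemma: odometer enumeration equals the itertools.product foldr shape
theorem gcuv_main : ∀ (opts : List (List String)),
    (List.range (gcuvPlen opts)).map
        (fun i => ((opts.reverse.foldl gcuvStep ([], i)).1).reverse)
      = gcuvProdList opts := by
  intro opts
  induction opts with
  | nil => simp [gcuvPlen, List.range_succ, gcuvProdList]
  | cons o L ih =>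
    have key : ∀ q r : Nat, q < o.length → r < gcuvPlen L →
        (((o :: L).reverse.foldl gcuvStep ([], q * gcuvPlen L + r)).1).reverse
          = o.getD q "" :: ((L.reverse.foldl gcuvStep ([], r)).1).reverse := by
      intro q r hq hr
      rw [List.reverse_cons, gcuv_foldl_step, gcuv_foldl_step]
      have hpl : gcuvPlen L.reverse = gcuvPlen L := gcuv_plen_reverse L
      have hpos : 0 < gcuvPlen L := Nat.zero_lt_of_lt hr
      have hdiv : (q * gcuvPlen L + r) / gcuvPlen L = q := by
        rw [Nat.mul_comm q, Nat.mul_add_div hpos, Nat.div_eq_of_lt hr, Nat.add_zero]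
      have hmod : (q * gcuvPlen L + r) % gcuvPlen L = r := by
        rw [Nat.mul_comm q, Nat.mul_add_mod, Nat.mod_eq_of_lt hr]
      have hdig : gcuvDigits L.reverse (q * gcuvPlen L + r) = gcuvDigits L.reverse r := by
        rw [← gcuv_digits_mod, hpl, hmod]
      rw [gcuv_digits_append, hpl, hdiv, hdig]
      simp [gcuvDigits, Nat.mod_eq_of_lt hq]
    show (List.range (gcuvPlen (o :: L))).map _ = _
    rw [show gcuvPlen (o :: L) = o.length * gcuvPlen L from rfl, gcuv_range_mul]
    rw [gcuvProdList]
    conv_rhs => rw [← gcuv_getD_range o]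
    rw [List.flatMap_map]
    apply List.flatMap_congr
    intro q hq
    rw [← ih, List.map_map]
    apply List.map_congr_left
    intro r hr
    simp only [List.mem_range] at hq hr
    simpa [Function.comp] using key q r hq hr

-- A's per-variable filter loop produces exactly a filterMap of the keys
theorem gvo_eq (names : List String) : ∀ (d : List (String × String)) (acc : List String),
    d.foldl (fun options k => if k.1 ∈ names then options else options ++ [k.1]) acc
      = acc ++ d.filterMap (fun kv => if kv.1 ∈ names then none else some kv.1) := by
  intro d
  induction d with
  | nil => intro acc; simp
  | cons kv d ih =>
    intro acc
    by_cases h : kv.1 ∈ names <;> simp [List.foldl_cons, h, ih]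

-- A's foldl that appends singletons builds a map
theorem foldl_append_singleton {α β : Type} (f : α → β) : ∀ (l : List α) (acc : List β),
    l.foldl (fun a v => a ++ [f v]) acc = acc ++ l.map f := by
  intro l
  induction l with
  | nil => intro acc; simp
  | cons x l ih => intro acc; simp [List.foldl_cons, ih]

-- A's foldr is literally gcuvProdList
theorem foldr_prodList : ∀ (Ls : List (List String)),
    Ls.foldr (fun opts rest => opts.flatMap (fun o => rest.map (fun r => o :: r))) [[]]
      = gcuvProdList Ls := by
  intro Ls
  induction Ls with
  | nil => rfl
  | cons o Ls ih => simp [gcuvProdList, ih]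

-- ===== VERDICT (by name: the statement is the Claim_ definition above) =====
theorem get_combinations_unknown_vars_spec : Claim_equal_get_combinations_unknown_vars := by
  intro unknown_vars data_names data _ _
  unfold Spec_get_combinations_unknown_vars get_combinations_unknown_vars get_combinations_unknown_vars_alt
  rw [foldl_append_singleton
      (fun var => (get_var_options (((PySem.Dict.mk data).get? var).getD []) data_names).map
        (fun s => var ++ ":" ++ s))]
  simp only [List.nil_append, foldr_prodList, gcuv_foldl_mul, Nat.one_mul]
  rw [← gcuv_main]
  have hopts : (unknown_vars.map (fun var =>
      (get_var_options (((PySem.Dict.mk data).get? var).getD []) data_names).map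
        (fun s => var ++ ":" ++ s)))
    = unknown_vars.map (fun var =>
      (((PySem.Dict.mk data).get? var).getD []).filterMap
        (fun kv : String × String => if data_names.contains kv.1 then none else some (var ++ ":" ++ kv.1))) := by
    apply List.map_congr_left
    intro var _
    simp [get_var_options, gvo_eq, List.map_filterMap,
      apply_ite (Option.map (fun s => var ++ ":" ++ s))]
  rw [hopts]
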